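-- pv_equiv track=rewrite | github.com/estherbs/iovana.github.io | reddiment.py | topten
-- ===== SOURCE A (Python) =====
-- def topten(arr):
--     i = 0
--     finalarr = []
--     while i < 10:
--         if len(arr) > i:
--             mypair = arr[i]
--             if mypair[1] < 10:
--                 finalarr.append(" " + str(mypair[1]) + " - " + mypair[0].capitalize())
--             else:
--                 finalarr.append(str(mypair[1]) + " - " + mypair[0].capitalize())
--         else:
--             finalarr.append("N/A")
--         i += 1
--     return finalarr
-- ===== SOURCE B (Python) =====
-- def topten(arr):
--     # Structural recursion on the list with a slot countdown, instead of an index loop.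
--     def go(rest, slots):
--         if slots == 0:
--             return []
--         if not rest:
--             return ["N/A"] * slots
--         word, score = rest[0]
--         line = (" " if score < 10 else "") + str(score) + " - " + word.capitalize()
--         return [line] + go(rest[1:], slots - 1)
--     return go(arr, 10)
-- ===== Notes on version B (the rewrite author's own statement) =====
-- stated objective: alternative
-- what changed: Replaces A's index-counting while loop with bounds checks against len(arr) by structural recursion on the list with a slot countdown: consume one entry per call and, once the list is exhausted, emit the remaining slots as 'N/A' in one replication step.
import Mathlib
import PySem

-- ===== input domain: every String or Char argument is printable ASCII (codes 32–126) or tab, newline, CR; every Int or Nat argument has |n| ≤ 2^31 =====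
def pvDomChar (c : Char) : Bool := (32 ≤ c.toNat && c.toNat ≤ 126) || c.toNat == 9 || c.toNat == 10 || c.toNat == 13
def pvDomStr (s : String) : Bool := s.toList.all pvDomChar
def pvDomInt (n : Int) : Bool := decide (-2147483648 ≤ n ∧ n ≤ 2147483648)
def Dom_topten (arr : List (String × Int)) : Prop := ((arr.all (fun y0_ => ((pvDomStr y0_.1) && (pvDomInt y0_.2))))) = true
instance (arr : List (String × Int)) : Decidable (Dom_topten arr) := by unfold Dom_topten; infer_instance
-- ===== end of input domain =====

-- B replaces A's index-counting while loop by structural recursion on the list with a slot countdown (objective: alternative).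


-- str.capitalize(): first char uppercased, the rest lowercased; exact on the ASCII domain
def pyCapitalize (s : String) : String :=
  match s.toList with
  | [] => ""
  | c :: rest => String.ofList (PySem.Chars.upperChar c :: rest.map PySem.Chars.lowerChar)

-- ===== PORT A =====
def topten (arr : List (String × Int)) : List String :=
  (PySem.List.pyRange 0 10 1).foldl (fun finalarr i =>
    if (arr.length : Int) > i then
      let mypair := PySem.List.pyGetD arr i ("", 0)
      if mypair.2 < 10 then
        finalarr ++ [" " ++ PySem.Int.toStr mypair.2 ++ " - " ++ pyCapitalize mypair.1]
      else
        finalarr ++ [PySem.Int.toStr mypair.2 ++ " - " ++ pyCapitalize mypair.1]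
    else finalarr ++ ["N/A"]) []

-- ===== PORT B =====
-- recursive helper go(rest, slots) from Source B
def toptenGo : List (String × Int) → Nat → List String
  | _, 0 => []
  | [], slots => List.replicate slots "N/A"
  | (word, score) :: rest, slots + 1 =>
      ((if score < 10 then " " else "") ++ PySem.Int.toStr score ++ " - " ++ pyCapitalize word)
        :: toptenGo rest slots

def topten_alt (arr : List (String × Int)) : List String := toptenGo arr 10

-- ===== PRECONDITION & SPEC =====
def Spec_topten (arr : List (String × Int)) (out : List String) : Prop := out = topten_alt arr
instance (arr : List (String × Int)) (out : List String) : Decidable (Spec_topten arr out) := by unfold Spec_topten; infer_instance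

-- ===== CLAIM (what is proved, stated in full; the proofs are below) =====
def Claim_equal_topten : Prop := ∀ (arr : List (String × Int)), Dom_topten arr → Spec_topten arr (topten arr)

-- ===== LEMMAS AND PROOFS =====
theorem pv_ite_append_push {c : Prop} [Decidable c] (acc : List String) (x y : String) :
    (if c then acc ++ [x] else acc ++ [y]) = acc ++ [if c then x else y] := by
  split <;> rfl

theorem pv_ite_space {c : Prop} [Decidable c] (t u v : String) :
    (if c then " " ++ t ++ u ++ v else t ++ u ++ v) = (if c then " " else "") ++ t ++ u ++ v := by
  split <;> simp

-- A only reads the first ten entries and compares the length with indices < 10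
theorem topten_big (l : List (String × Int)) (h : 10 ≤ l.length) :
    topten l = topten (l.take 10) := by
  unfold topten
  apply PySem.List.foldl_congr_mem
  intro acc x hx
  rcases (PySem.List.mem_pyRange_one).1 hx with ⟨hx0, hx10⟩
  have hget : PySem.List.pyGetD l x ("", 0) = PySem.List.pyGetD (l.take 10) x ("", 0) := by
    have hx' : x.toNat < 10 := by omega
    rw [PySem.List.pyGetD_of_nonneg, PySem.List.pyGetD_of_nonneg] <;>
      simp [List.getD, hx', hx0]
  have h1 : ((l.length : Int) > x) := by omega
  have h2 : (((l.take 10).length : Int) > x) := by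
    simp [List.length_take]; omega
  simp [h1, hget]
  intro h3
  exact absurd hx10 (by omega)

-- ===== VERDICT (by name: the statement is the Claim_ definition above) =====
theorem topten_spec : Claim_equal_topten := by
  intro arr _
  unfold Spec_topten topten_alt
  rcases arr with _|⟨a0,arr⟩
  · simp [topten, toptenGo, PySem.List.pyRange, List.range_succ, List.replicate,
      PySem.List.pyGetD, pv_ite_append_push, pv_ite_space]
  rcases arr with _|⟨a1,arr⟩
  · simp [topten, toptenGo, PySem.List.pyRange, List.range_succ, List.replicate,
      PySem.List.pyGetD, pv_ite_append_push, pv_ite_space]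
  rcases arr with _|⟨a2,arr⟩
  · simp [topten, toptenGo, PySem.List.pyRange, List.range_succ, List.replicate,
      PySem.List.pyGetD, pv_ite_append_push, pv_ite_space]
  rcases arr with _|⟨a3,arr⟩
  · simp [topten, toptenGo, PySem.List.pyRange, List.range_succ, List.replicate,
      PySem.List.pyGetD, pv_ite_append_push, pv_ite_space]
  rcases arr with _|⟨a4,arr⟩
  · simp [topten, toptenGo, PySem.List.pyRange, List.range_succ, List.replicate,
      PySem.List.pyGetD, pv_ite_append_push, pv_ite_space]
  rcases arr with _|⟨a5,arr⟩
  · simp [topten, toptenGo, PySem.List.pyRange, List.range_succ, List.replicate,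
      PySem.List.pyGetD, pv_ite_append_push, pv_ite_space]
  rcases arr with _|⟨a6,arr⟩
  · simp [topten, toptenGo, PySem.List.pyRange, List.range_succ, List.replicate,
      PySem.List.pyGetD, pv_ite_append_push, pv_ite_space]
  rcases arr with _|⟨a7,arr⟩
  · simp [topten, toptenGo, PySem.List.pyRange, List.range_succ, List.replicate,
      PySem.List.pyGetD, pv_ite_append_push, pv_ite_space]
  rcases arr with _|⟨a8,arr⟩
  · simp [topten, toptenGo, PySem.List.pyRange, List.range_succ, List.replicate,
      PySem.List.pyGetD, pv_ite_append_push, pv_ite_space]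
  rcases arr with _|⟨a9,arr⟩
  · simp [topten, toptenGo, PySem.List.pyRange, List.range_succ, List.replicate,
      PySem.List.pyGetD, pv_ite_append_push, pv_ite_space]
  rcases arr with _|⟨a10,arr⟩
  · simp [topten, toptenGo, PySem.List.pyRange, List.range_succ, List.replicate,
      PySem.List.pyGetD, pv_ite_append_push, pv_ite_space]
  rw [topten_big _ (by simp)]
  simp [topten, toptenGo, PySem.List.pyRange, List.range_succ, List.replicate,
      PySem.List.pyGetD, pv_ite_append_push, pv_ite_space]
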